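-- pv_equiv track=rewrite | github.com/mdjbru-forge/pygenesSQLite | pygenes.py | seqConsensusList
-- ===== SOURCE A (Python) =====
-- def seqConsensusList(seqList) :
--     """Determine the consensus between sequences, replacing mismatches by X
--
--     Args:
--         seqList (list of str): Sequences
--
--     Returns:
--         str: The consensus sequence
--
--     """
--     o = ""
--     assert len(seqList) > 0
--     length = len(seqList[0])
--     assert all([len(x) == length for x in seqList])
--     for i in range(length) :
--         chars = set([x[i] for x in seqList])
--         if len(chars) == 1 :
--             o += seqList[0][i]
--         else :
--             o += "X"
--     return o
-- ===== SOURCE B (Python) =====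
-- def seqConsensusList(seqList):
--     """Determine the consensus between sequences, replacing mismatches by X.
--
--     Row-major re-implementation: walk the sequences once, collecting the set of
--     positions where any sequence disagrees with the first one, then emit the
--     first sequence with those positions replaced by 'X'.
--     """
--     assert len(seqList) > 0
--     ref = seqList[0]
--     length = len(ref)
--     assert all([len(x) == length for x in seqList])
--     mismatch = set()
--     for seq in seqList[1:]:
--         for i in range(length):
--             if seq[i] != ref[i]:
--                 mismatch.add(i)
--     return "".join("X" if i in mismatch else ref[i] for i in range(length))
-- ===== Notes on version B (the rewrite author's own statement) =====
-- stated objective: alternative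
-- what changed: Flipped A's column-major loop (per position, build a set of that column's characters) to a row-major single sweep over the sequences that accumulates a set of mismatch positions against the first sequence, then emits the output in one pass.
import Mathlib
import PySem

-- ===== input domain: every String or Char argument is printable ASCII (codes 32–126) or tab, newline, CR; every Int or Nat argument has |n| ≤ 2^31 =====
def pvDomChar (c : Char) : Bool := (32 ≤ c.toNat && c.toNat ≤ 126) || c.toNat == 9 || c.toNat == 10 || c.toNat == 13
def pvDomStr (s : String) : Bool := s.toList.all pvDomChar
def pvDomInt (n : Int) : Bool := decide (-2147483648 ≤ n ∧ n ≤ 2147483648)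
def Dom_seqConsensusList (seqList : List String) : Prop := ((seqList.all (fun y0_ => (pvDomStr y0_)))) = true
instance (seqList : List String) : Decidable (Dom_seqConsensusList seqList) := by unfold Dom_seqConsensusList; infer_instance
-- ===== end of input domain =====

-- B replaces A's column-major nesting (per position, a set of that column's chars)
-- by a row-major sweep maintaining a set of mismatch positions; objective: alternative.

-- ===== PORT A =====
def seqConsensusList (seqList : List String) : String :=
  let ref := PySem.List.pyGetD (seqList.map String.toList) 0 []   -- seqList[0]
  let length : Int := ref.length
  let o := (PySem.List.pyRange 0 length 1).foldl (fun o i =>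
    let chars : PySem.Set Char :=
      PySem.Set.ofList (seqList.map (fun x => PySem.List.pyGetD x.toList i ' '))
    if chars.length = 1 then o ++ [PySem.List.pyGetD ref i ' ']
    else o ++ ['X']) []
  String.ofList o

-- ===== PORT B =====
def seqConsensusList_alt (seqList : List String) : String :=
  let ref := PySem.List.pyGetD (seqList.map String.toList) 0 []   -- seqList[0]
  let length : Int := ref.length
  let mismatch : PySem.Set Int :=
    ((seqList.map String.toList).drop 1).foldl (fun m seq =>
      (PySem.List.pyRange 0 length 1).foldl (fun m i =>
        if PySem.List.pyGetD seq i ' ' ≠ PySem.List.pyGetD ref i ' '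
        then PySem.Set.add m i else m) m)
      PySem.Set.empty
  String.ofList ((PySem.List.pyRange 0 length 1).map (fun i =>
    if PySem.Set.contains mismatch i then 'X' else PySem.List.pyGetD ref i ' '))

-- ===== PRECONDITION & SPEC =====
-- Pre_ excludes exactly the inputs on which A's asserts raise AssertionError:
-- the empty list and lists whose sequences do not all have the first sequence's length.
def Pre_seqConsensusList (seqList : List String) : Prop :=
  seqList ≠ [] ∧ ∀ x ∈ seqList, x.length = (seqList.headD "").length
instance (seqList : List String) : Decidable (Pre_seqConsensusList seqList) := by
  unfold Pre_seqConsensusList; infer_instance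
def pvWitness_seqConsensusList : List String := ["AB", "AC"]

def Spec_seqConsensusList (seqList : List String) (out : String) : Prop := out = seqConsensusList_alt seqList
instance (seqList : List String) (out : String) : Decidable (Spec_seqConsensusList seqList out) := by unfold Spec_seqConsensusList; infer_instance

-- ===== CLAIM (what is proved, stated in full; the proofs are below) =====
def Claim_equal_seqConsensusList : Prop := ∀ (seqList : List String), Dom_seqConsensusList seqList → Pre_seqConsensusList seqList → Spec_seqConsensusList seqList (seqConsensusList seqList)

-- ===== LEMMAS AND PROOFS =====

-- membership in the inner per-sequence loop of B: old members plus positions of l where p holds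
theorem pv_mem_foldl_add_if (l : List Int) (m : PySem.Set Int) (p : Int → Prop)
    [DecidablePred p] (j : Int) :
    j ∈ l.foldl (fun m i => if p i then PySem.Set.add m i else m) m ↔
      j ∈ m ∨ (j ∈ l ∧ p j) := by
  induction l generalizing m with
  | nil => simp
  | cons a t ih =>
    simp only [List.foldl_cons, ih, List.mem_cons]
    by_cases h : p a
    · simp [h, PySem.Set.mem_add]
      constructor
      · rintro (⟨h1 | h1⟩ | h2)
        · exact Or.inl h1
        · subst h1; exact Or.inr ⟨Or.inl rfl, h⟩
        · exact Or.inr ⟨Or.inr h2.1, h2.2⟩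
      · rintro (h1 | ⟨h1 | h1, h2⟩)
        · exact Or.inl (Or.inl h1)
        · subst h1; exact Or.inl (Or.inr rfl)
        · exact Or.inr ⟨h1, h2⟩
    · simp [h]
      constructor
      · rintro (h1 | h2)
        · exact Or.inl h1
        · exact Or.inr ⟨Or.inr h2.1, h2.2⟩
      · rintro (h1 | ⟨h1 | h1, h2⟩)
        · exact Or.inl h1
        · exact absurd (h1 ▸ h2) h
        · exact Or.inr ⟨h1, h2⟩

-- membership in B's mismatch set: some sequence of ss disagrees at position j
theorem pv_mem_mismatch (ss : List (List Char)) (rng : List Int) (m : PySem.Set Int)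
    (q : List Char → Int → Prop) [∀ s i, Decidable (q s i)] (j : Int) :
    j ∈ ss.foldl (fun m seq =>
        rng.foldl (fun m i => if q seq i then PySem.Set.add m i else m) m) m ↔
      j ∈ m ∨ (j ∈ rng ∧ ∃ s ∈ ss, q s j) := by
  induction ss generalizing m with
  | nil => simp
  | cons s t ih =>
    simp only [List.foldl_cons, ih, pv_mem_foldl_add_if, List.mem_cons]
    constructor
    · rintro ((h1 | h2) | h3)
      · exact Or.inl h1
      · exact Or.inr ⟨h2.1, s, by simp, h2.2⟩
      · obtain ⟨hr, w, hw, hq⟩ := h3; exact Or.inr ⟨hr, w, by simp [hw], hq⟩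
    · rintro (h1 | ⟨hr, w, hw | hw, hq⟩)
      · exact Or.inl (Or.inl h1)
      · exact Or.inl (Or.inr ⟨hr, hw ▸ hq⟩)
      · exact Or.inr ⟨hr, w, hw, hq⟩

-- a Python set built from a nonempty list has one element iff all elements equal the head
theorem pv_ofList_len_one {α : Type} [BEq α] [LawfulBEq α] (a : α) (xs : List α) :
    (PySem.Set.ofList (a :: xs)).length = 1 ↔ ∀ x ∈ xs, x = a := by
  rw [PySem.Set.ofList_cons]
  constructor
  · intro hlen x hx
    by_contra hne
    have hm : x ∈ (PySem.Set.ofList xs).discard a := by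
      rw [PySem.Set.mem_discard]; exact ⟨(PySem.Set.mem_ofList _ _).2 hx, hne⟩
    have h0 : ((PySem.Set.ofList xs).discard a).length = 0 := by
      simpa using hlen
    rw [List.length_eq_zero_iff] at h0
    simp [h0] at hm
  · intro h
    have hnil : (PySem.Set.ofList xs).discard a = [] := by
      rw [List.eq_nil_iff_forall_not_mem]
      intro y hy
      rw [PySem.Set.mem_discard, PySem.Set.mem_ofList] at hy
      exact hy.2 (h y hy.1)
    simp [hnil]

-- A's loop is an append-of-singletons fold: rewrite it as a map over the range
theorem pv_A_fold_eq_map (rng : List Int) (c : Int → Prop) [DecidablePred c]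
    (f : Int → Char) (o : List Char) :
    rng.foldl (fun o i => if c i then o ++ [f i] else o ++ ['X']) o =
      o ++ rng.map (fun i => if c i then f i else 'X') := by
  have : (fun (o : List Char) i => if c i then o ++ [f i] else o ++ ['X']) =
      fun o i => o ++ [if c i then f i else 'X'] := by
    funext o i; split <;> rfl
  rw [this, PySem.List.foldl_append_singleton_eq_map]

-- ===== VERDICT (by name: the statement is the Claim_ definition above) =====
theorem seqConsensusList_spec : Claim_equal_seqConsensusList := by
  intro seqList _hDom _hPre
  unfold Spec_seqConsensusList seqConsensusList seqConsensusList_alt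
  simp only
  rw [pv_A_fold_eq_map]
  simp only [List.nil_append]
  congr 1
  apply List.map_congr_left
  intro i _hi
  set ref := PySem.List.pyGetD (seqList.map String.toList) 0 [] with href
  have hmem : ∀ j : Int,
      (PySem.Set.contains (((seqList.map String.toList).drop 1).foldl (fun m seq =>
        (PySem.List.pyRange 0 (ref.length : Int) 1).foldl (fun m i =>
          if PySem.List.pyGetD seq i ' ' ≠ PySem.List.pyGetD ref i ' '
          then PySem.Set.add m i else m) m) PySem.Set.empty) j) = true ↔
      (j ∈ PySem.List.pyRange 0 (ref.length : Int) 1 ∧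
        ∃ s ∈ (seqList.map String.toList).drop 1,
          PySem.List.pyGetD s j ' ' ≠ PySem.List.pyGetD ref j ' ') := by
    intro j
    rw [PySem.Set.contains_iff,
      pv_mem_mismatch ((seqList.map String.toList).drop 1)
        (PySem.List.pyRange 0 (ref.length : Int) 1) PySem.Set.empty
        (fun s i => PySem.List.pyGetD s i ' ' ≠ PySem.List.pyGetD ref i ' ') j]
    simp [PySem.Set.empty]
  -- the character set at column i has one element iff no later sequence disagrees with ref
  rcases seqList with _ | ⟨h, t⟩
  · exact absurd rfl _hPre.1
  · have hmap : ((h :: t).map (fun x => PySem.List.pyGetD x.toList i ' ')) =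
        PySem.List.pyGetD h.toList i ' ' :: t.map (fun x => PySem.List.pyGetD x.toList i ' ') := rfl
    have hrefh : ref = h.toList := by simp [href, PySem.List.pyGetD]
    rw [hmap]
    by_cases hc : ∀ x ∈ t.map (fun x => PySem.List.pyGetD x.toList i ' '),
        x = PySem.List.pyGetD h.toList i ' '
    · rw [if_pos ((pv_ofList_len_one _ _).2 hc), if_neg]
      intro hcon
      obtain ⟨-, s, hs, hne⟩ := (hmem i).1 hcon
      simp only [List.map_cons, List.drop_succ_cons, List.drop_zero, List.mem_map] at hs
      obtain ⟨x, hx, rfl⟩ := hs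
      rw [hrefh] at hne
      exact hne (hc _ (List.mem_map_of_mem hx))
    · rw [if_neg (fun hl => hc ((pv_ofList_len_one _ _).1 hl)), if_pos]
      refine (hmem i).2 ⟨_hi, ?_⟩
      push_neg at hc
      obtain ⟨x, hx, hne⟩ := hc
      simp only [List.mem_map] at hx
      obtain ⟨sq, hs, rfl⟩ := hx
      refine ⟨sq.toList, ?_, ?_⟩
      · simp only [List.map_cons, List.drop_succ_cons, List.drop_zero, List.mem_map]
        exact ⟨sq, hs, rfl⟩
      · rw [hrefh]; exact hne
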